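-- pv_equiv track=rewrite | github.com/paulelso/katas | sum_of_indexes.py | sum_of_indexes
-- ===== SOURCE A (Python) =====
-- def sum_of_indexes(lst):
--     sum_of_odd_indexes = 0
--     sum_of_even_indexes = 0
--     for i in range(len(lst)):
--         if i % 2 == 0:
--             sum_of_even_indexes += lst[i]
--         else:
--             sum_of_odd_indexes += lst[i]
--
--     return ([sum_of_even_indexes, sum_of_odd_indexes])
-- ===== SOURCE B (Python) =====
-- def sum_of_indexes(lst):
--     return [sum(lst[::2]), sum(lst[1::2])]
-- ===== Notes on version B (the rewrite author's own statement) =====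
-- stated objective: idiomatic
-- what changed: The single indexed loop with an i%2 parity branch is replaced by two strided slice sums (lst[::2] and lst[1::2]): no index variable, no branch, two strided passes instead of one interleaved pass.
import Mathlib
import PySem

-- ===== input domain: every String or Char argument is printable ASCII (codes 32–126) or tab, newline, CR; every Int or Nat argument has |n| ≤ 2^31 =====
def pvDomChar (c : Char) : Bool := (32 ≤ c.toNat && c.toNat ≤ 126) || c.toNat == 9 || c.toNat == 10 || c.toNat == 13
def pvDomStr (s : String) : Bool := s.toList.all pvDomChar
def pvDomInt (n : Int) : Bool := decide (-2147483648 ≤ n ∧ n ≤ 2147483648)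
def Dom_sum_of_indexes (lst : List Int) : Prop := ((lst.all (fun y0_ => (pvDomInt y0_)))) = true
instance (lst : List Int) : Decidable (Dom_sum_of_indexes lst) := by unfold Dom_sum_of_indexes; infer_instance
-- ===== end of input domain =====

-- B replaces A's indexed loop with its i%2 branch by two strided slice sums (idiomatic; same cost).


-- ===== PORT A =====
-- for i in range(len(lst)): if i % 2 == 0: even += lst[i] else: odd += lst[i]; state = (odd, even)
def sum_of_indexes (lst : List Int) : List Int :=
  let p := (PySem.List.pyRange 0 (lst.length : Int) 1).foldl
    (fun (s : Int × Int) i =>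
      if PySem.Int.mod i 2 == 0 then (s.1, s.2 + PySem.List.pyGetD lst i 0)
      else (s.1 + PySem.List.pyGetD lst i 0, s.2)) (0, 0)
  [p.2, p.1]

-- ===== PORT B =====
-- lst[::2], ported by hand as a take-one-skip-one recursion (exact: step-2 slice from the front)
def everyOther : List Int → List Int
  | [] => []
  | [x] => [x]
  | x :: _ :: xs => x :: everyOther xs

-- return [sum(lst[::2]), sum(lst[1::2])]  (lst[1::2] = every other element of lst.tail)
def sum_of_indexes_alt (lst : List Int) : List Int :=
  [(everyOther lst).sum, (everyOther lst.tail).sum]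

-- ===== PRECONDITION & SPEC =====
def Spec_sum_of_indexes (lst : List Int) (out : List Int) : Prop := out = sum_of_indexes_alt lst
instance (lst : List Int) (out : List Int) : Decidable (Spec_sum_of_indexes lst out) := by unfold Spec_sum_of_indexes; infer_instance

-- ===== CLAIM (what is proved, stated in full; the proofs are below) =====
def Claim_equal_sum_of_indexes : Prop := ∀ (lst : List Int), Dom_sum_of_indexes lst → Spec_sum_of_indexes lst (sum_of_indexes lst)

-- ===== LEMMAS AND PROOFS =====
theorem everyOther_cons (y : Int) (t : List Int) :
    everyOther (y :: t) = y :: everyOther t.tail := by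
  cases t <;> simp [everyOther]

theorem loop_spec (lst : List Int) (pre ys : List Int) (s : Int × Int)
    (h : lst = pre ++ ys) :
    (PySem.List.pyRange (pre.length : Int) ((pre.length : Int) + (ys.length : Int)) 1).foldl
      (fun (s : Int × Int) i =>
        if PySem.Int.mod i 2 == 0 then (s.1, s.2 + PySem.List.pyGetD lst i 0)
        else (s.1 + PySem.List.pyGetD lst i 0, s.2)) s
    = if pre.length % 2 = 0 then
        (s.1 + (everyOther ys.tail).sum, s.2 + (everyOther ys).sum)
      else
        (s.1 + (everyOther ys).sum, s.2 + (everyOther ys.tail).sum) := by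
  induction ys generalizing pre s with
  | nil => simp [PySem.List.pyRange_one_eq_nil, everyOther]
  | cons y t ih =>
    have hcons : PySem.List.pyRange (pre.length : Int) ((pre.length : Int) + ((t.length : Int) + 1)) 1
        = (pre.length : Int) :: PySem.List.pyRange ((pre.length : Int) + 1) ((pre.length : Int) + ((t.length : Int) + 1)) 1 :=
      PySem.List.pyRange_one_cons (by omega)
    have hget : PySem.List.pyGetD lst (pre.length : Int) 0 = y := by
      subst h
      simp [PySem.List.pyGetD_natCast, List.getD_eq_getElem?_getD]
    have hlen : ((pre ++ [y]).length : Int) = (pre.length : Int) + 1 := by simp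
    have hrng : PySem.List.pyRange ((pre.length : Int) + 1) ((pre.length : Int) + ((t.length : Int) + 1)) 1
        = PySem.List.pyRange (((pre ++ [y]).length : Int)) (((pre ++ [y]).length : Int) + (t.length : Int)) 1 := by
      rw [hlen]; ring_nf
    have hih := ih (pre ++ [y]) (if PySem.Int.mod (pre.length : Int) 2 == 0
        then (s.1, s.2 + y) else (s.1 + y, s.2)) (by simp [h])
    have hmod : (PySem.Int.mod (pre.length : Int) 2 == 0) = decide (pre.length % 2 = 0) := by
      have h0 : PySem.Int.mod (pre.length : Int) 2 = ((pre.length % 2 : Nat) : Int) := by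
        simp [PySem.Int.mod, Int.fmod_eq_emod]
      rw [h0]
      rcases Nat.mod_two_eq_zero_or_one pre.length with h2 | h2 <;> simp [h2]
    simp only [List.length_cons]
    push_cast
    rw [hcons]
    simp only [List.foldl_cons, hget, hrng]
    rw [hih]
    simp only [List.length_append, List.length_cons, List.length_nil, hmod]
    rw [everyOther_cons, List.tail_cons]
    by_cases hp : pre.length % 2 = 0
    · have : (pre.length + 1) % 2 ≠ 0 := by omega
      simp [hp, this, List.sum_cons]
      ring
    · have : (pre.length + 1) % 2 = 0 := by omega
      simp [hp, this, List.sum_cons]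
      ring

-- ===== VERDICT (by name: the statement is the Claim_ definition above) =====
theorem sum_of_indexes_spec : Claim_equal_sum_of_indexes := by
  intro lst _
  unfold Spec_sum_of_indexes sum_of_indexes sum_of_indexes_alt
  have h : (PySem.List.pyRange 0 ((lst.length : Int)) 1).foldl
      (fun (s : Int × Int) i =>
        if PySem.Int.mod i 2 == 0 then (s.1, s.2 + PySem.List.pyGetD lst i 0)
        else (s.1 + PySem.List.pyGetD lst i 0, s.2)) (0, 0)
      = ((everyOther lst.tail).sum, (everyOther lst).sum) := by
    simpa using loop_spec lst [] lst ((0 : Int), (0 : Int)) (by simp)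
  rw [h]
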